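-- pv_equiv track=rewrite | github.com/pypi-data/pypi-mirror-32 | packages/hubtype/hubtype-0.1.2.tar.gz/hubtype-0.1.2/hubtype/ht.py | botson_remove_multiline
-- ===== SOURCE A (Python) =====
-- def botson_remove_multiline(botson_string):
--     #-----------------Allow multiline-----------------
--     multiline = ""
--     multilines = 1
--     json_string = ""
--     for line in botson_string.split('\n'):
--         if multiline:
--             lstr = line.strip() #Quit first and last whitespaces
--         else:
--             lstr = line.rstrip() #Quit last whitespaces
--         if not lstr:
--             continue
--         dc = line.count('"')
--         cc = line.count('\\"')
--         abscom = (dc - cc)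
--         if len(lstr) and ( abscom%2
--             or (multilines > 1 and abscom == 0)): #odd number of " without \" means open string
--                                                   #0 absolute " and multiline means line continue
--             multiline += lstr + " "
--             multilines += 1
--         else:
--             json_string += multiline+lstr+'\n'*multilines
--             multiline = ""
--             multilines = 1
--     return json_string
-- ===== SOURCE B (Python) =====
-- def botson_remove_multiline(botson_string):
--     # Classify each non-blank line by its quote balance (state-free), then chop the
--     # line list into closed groups by lookahead: an even-balance line alone is a
--     # group; an odd-balance line opens a run of odd-or-zero-balance continuation
--     # lines terminated by the next even-nonzero line (an unterminated run yields
--     # nothing, and nothing after it either).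
--     def abscom(line):
--         return line.count('"') - line.count('\\"')
--
--     lines = [l for l in botson_string.split('\n') if l.strip()]
--     out = []
--     i, n = 0, len(lines)
--     while i < n:
--         if abscom(lines[i]) % 2 == 0:
--             out.append(lines[i].rstrip() + '\n')
--             i += 1
--         else:
--             j = i + 1
--             while j < n and (abscom(lines[j]) % 2 != 0 or abscom(lines[j]) == 0):
--                 j += 1
--             if j == n:
--                 break  # unterminated multiline: dropped
--             out.append(lines[i].rstrip() + ' '
--                        + ''.join(lines[k].strip() + ' ' for k in range(i + 1, j))
--                        + lines[j].strip() + '\n' * (j - i + 1))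
--             i = j + 1
--     return ''.join(out)
-- ===== Notes on version B (the rewrite author's own statement) =====
-- stated objective: alternative
-- what changed: A threads a mutable multiline buffer and line counter through one stateful loop; B first filters out blank lines (blankness is state-independent), classifies each remaining line by its raw quote balance alone, and chops the line list into closed groups by lookahead (an even-balance line is a singleton group; an odd-balance line plus the following run of odd-or-zero-balance lines is closed by the next even-nonzero line, an unterminated run being dropped), rendering each group directly.
import Mathlib
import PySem

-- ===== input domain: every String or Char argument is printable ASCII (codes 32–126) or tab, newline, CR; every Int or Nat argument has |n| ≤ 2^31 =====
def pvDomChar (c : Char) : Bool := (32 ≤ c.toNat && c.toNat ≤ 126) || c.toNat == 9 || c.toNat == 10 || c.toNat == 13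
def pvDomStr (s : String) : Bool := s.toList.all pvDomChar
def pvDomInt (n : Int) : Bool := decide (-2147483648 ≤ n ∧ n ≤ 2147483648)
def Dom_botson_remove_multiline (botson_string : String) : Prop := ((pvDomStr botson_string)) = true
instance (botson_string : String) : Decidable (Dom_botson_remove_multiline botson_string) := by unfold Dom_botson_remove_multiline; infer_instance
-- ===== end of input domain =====

-- B replaces A's single stateful fold (buffer + counter) by a state-free classification of
-- each non-blank line plus lookahead grouping (takeWhile/dropWhile chops one closed group
-- off the front at a time); same output, objective: alternative algorithm, no speed claim.

-- ===== PORT A =====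
-- state = (multiline, multilines, json_string), strings as List Char
def btA_step (st : List Char × Int × List Char) (line : List Char) :
    List Char × Int × List Char :=
  let lstr := if st.1 ≠ [] then PySem.Chars.strip line else PySem.Chars.rstrip line
  if lstr = [] then st
  else
    let dc : Int := PySem.Chars.count line ['"']
    let cc : Int := PySem.Chars.count line ['\\', '"']
    let abscom : Int := dc - cc
    if lstr.length ≠ 0 ∧ (PySem.Int.mod abscom 2 ≠ 0 ∨ (st.2.1 > 1 ∧ abscom = 0)) then
      (st.1 ++ lstr ++ [' '], st.2.1 + 1, st.2.2)
    else
      ([], 1, st.2.2 ++ st.1 ++ lstr ++ List.replicate st.2.1.toNat '\n')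

def botson_remove_multiline (botson_string : String) : String :=
  String.ofList
    (((PySem.Chars.splitOn botson_string.toList ['\n']).foldl btA_step ([], 1, [])).2.2)

-- ===== PORT B =====
-- abscom(line), computed from the raw line (state-free)
def btAbscom (line : List Char) : Int :=
  (PySem.Chars.count line ['"'] : Int) - (PySem.Chars.count line ['\\', '"'] : Int)

-- continuation predicate of the inner while loop: odd quote balance, or balance zero
def btCont (line : List Char) : Bool :=
  PySem.Int.mod (btAbscom line) 2 != 0 || btAbscom line == 0

-- the outer while loop: chop one group off the front of the remaining line list
def btGo : List (List Char) → List Char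
  | [] => []
  | l :: rest =>
    if PySem.Int.mod (btAbscom l) 2 == 0 then
      PySem.Chars.rstrip l ++ '\n' :: btGo rest
    else
      let cont := rest.takeWhile btCont
      let rst := rest.dropWhile btCont
      if hne : rst = [] then []   -- unterminated multiline: dropped
      else
        PySem.Chars.rstrip l ++ [' ']
          ++ (cont.map (fun x => PySem.Chars.strip x ++ [' '])).flatten
          ++ PySem.Chars.strip (rst.head hne)
          ++ List.replicate (cont.length + 2) '\n'
          ++ btGo rst.tail
  termination_by ls => ls.length
  decreasing_by
    · simp
    · have h1 : (rest.dropWhile btCont).length ≤ rest.length :=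
        (List.dropWhile_sublist _).length_le
      have h2 : (rest.dropWhile btCont).tail.length = (rest.dropWhile btCont).length - 1 :=
        List.length_tail
      simp only [List.length_cons]
      omega

def botson_remove_multiline_alt (botson_string : String) : String :=
  String.ofList
    (btGo ((PySem.Chars.splitOn botson_string.toList ['\n']).filter
      (fun l => !(PySem.Chars.strip l).isEmpty)))

-- ===== PRECONDITION & SPEC =====
def Spec_botson_remove_multiline (botson_string : String) (out : String) : Prop := out = botson_remove_multiline_alt botson_string
instance (botson_string : String) (out : String) : Decidable (Spec_botson_remove_multiline botson_string out) := by unfold Spec_botson_remove_multiline; infer_instance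

-- ===== CLAIM =====
def Claim_equal_botson_remove_multiline : Prop := ∀ (botson_string : String), Dom_botson_remove_multiline botson_string → Spec_botson_remove_multiline botson_string (botson_remove_multiline botson_string)

-- ===== LEMMAS AND PROOFS =====

theorem strip_nil_iff (l : List Char) :
    PySem.Chars.strip l = [] ↔ PySem.Chars.rstrip l = [] := by
  simp only [PySem.Chars.strip, PySem.Chars.lstrip, PySem.Chars.rstrip,
    List.reverse_eq_nil_iff, List.dropWhile_eq_nil_iff, List.mem_reverse]
  constructor
  · intro h x hx
    rcases List.mem_append.mp
        ((List.takeWhile_append_dropWhile (p := PySem.Chars.isspace) (l := l)) ▸ hx) with h1 | h1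
    · exact List.mem_takeWhile_imp h1
    · exact h x h1
  · intro h x hx
    exact h x ((List.dropWhile_sublist _).mem hx)

-- blank lines are skipped by A regardless of state
theorem btA_step_blank (st : List Char × Int × List Char) (l : List Char)
    (h : PySem.Chars.strip l = []) : btA_step st l = st := by
  have hr : PySem.Chars.rstrip l = [] := (strip_nil_iff l).mp h
  simp [btA_step, h, hr]

-- so A's fold over all lines equals its fold over the non-blank lines
theorem btA_fold_filter (ls : List (List Char)) :
    ∀ st, ls.foldl btA_step st =
      (ls.filter (fun l => !(PySem.Chars.strip l).isEmpty)).foldl btA_step st := by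
  induction ls with
  | nil => intro st; rfl
  | cons l rest ih =>
    intro st
    by_cases h : PySem.Chars.strip l = []
    · simp [h, btA_step_blank st l h, ih]
    · simp [h, ih]

-- booleanised continuation test
theorem btCont_true_iff (l : List Char) :
    btCont l = true ↔ (PySem.Int.mod (btAbscom l) 2 ≠ 0 ∨ btAbscom l = 0) := by
  unfold btCont
  simp only [Bool.or_eq_true, bne_iff_ne, ne_eq, beq_iff_eq]

-- one A-step from a mid-multiline state (buffer non-empty) on a non-blank line
theorem btA_step_mid (buf : List Char) (hbuf : buf ≠ []) (m : Nat) (J : List Char)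
    (l : List Char) (hl : PySem.Chars.strip l ≠ []) :
    btA_step (buf, ((m : Int) + 2), J) l =
      (if btCont l then (buf ++ PySem.Chars.strip l ++ [' '], ((m : Int) + 2) + 1, J)
       else ([], 1, J ++ buf ++ PySem.Chars.strip l ++ List.replicate (m + 2) '\n')) := by
  have hlen : (PySem.Chars.strip l).length ≠ 0 := by
    simpa [List.length_eq_zero_iff] using hl
  have hgt : (1:Int) < (m : Int) + 2 := by omega
  have htn : ((m : Int) + 2).toNat = m + 2 := by omega
  simp only [btA_step]
  rw [if_pos hbuf, if_neg hl,
    show ((PySem.Chars.count l ['"'] : Int) - (PySem.Chars.count l ['\\', '"'] : Int))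
      = btAbscom l from rfl]
  by_cases hc : btCont l
  · rcases (btCont_true_iff l).mp hc with h | h
    · rw [if_pos ⟨hlen, Or.inl h⟩, if_pos hc]
    · rw [if_pos ⟨hlen, Or.inr ⟨hgt, h⟩⟩, if_pos hc]
  · have hb : PySem.Int.mod (btAbscom l) 2 = 0 ∧ btAbscom l ≠ 0 := by
      have := (btCont_true_iff l).not.mp hc
      push_neg at this
      exact this
    have hnc : ¬((PySem.Chars.strip l).length ≠ 0 ∧
        (PySem.Int.mod (btAbscom l) 2 ≠ 0 ∨ (((m : Int) + 2) > 1 ∧ btAbscom l = 0))) := by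
      rintro ⟨-, h | ⟨-, h⟩⟩
      · exact h hb.1
      · exact hb.2 h
    rw [if_neg hnc, if_neg hc, htn]

-- one A-step from a fresh state on a non-blank line
theorem btA_step_fresh (J : List Char) (l : List Char) (hl : PySem.Chars.strip l ≠ []) :
    btA_step ([], 1, J) l =
      (if PySem.Int.mod (btAbscom l) 2 == 0 then
        ([], 1, J ++ PySem.Chars.rstrip l ++ ['\n'])
       else (PySem.Chars.rstrip l ++ [' '], 2, J)) := by
  have hr : PySem.Chars.rstrip l ≠ [] := fun h => hl ((strip_nil_iff l).mpr h)
  have hrlen : (PySem.Chars.rstrip l).length ≠ 0 := by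
    simpa [List.length_eq_zero_iff] using hr
  simp only [btA_step]
  rw [if_neg (by simp : ¬(([] : List Char) ≠ [])), if_neg hr,
    show ((PySem.Chars.count l ['"'] : Int) - (PySem.Chars.count l ['\\', '"'] : Int))
      = btAbscom l from rfl]
  by_cases he : PySem.Int.mod (btAbscom l) 2 = 0
  · have hnc : ¬((PySem.Chars.rstrip l).length ≠ 0 ∧
        (PySem.Int.mod (btAbscom l) 2 ≠ 0 ∨ ((1 : Int) > 1 ∧ btAbscom l = 0))) := by
      rintro ⟨-, h | ⟨h, -⟩⟩
      · exact h he
      · exact absurd h (by norm_num)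
    rw [if_neg hnc, if_pos (beq_iff_eq.mpr he)]
    simp
  · rw [if_pos ⟨hrlen, Or.inl he⟩, if_neg (by simpa using he)]
    norm_num

-- btGo equations (the definition uses well-founded recursion)
theorem btGo_cons_even (l : List Char) (rest : List (List Char))
    (he : PySem.Int.mod (btAbscom l) 2 = 0) :
    btGo (l :: rest) = PySem.Chars.rstrip l ++ '\n' :: btGo rest := by
  rw [btGo]
  rw [if_pos (beq_iff_eq.mpr he)]

theorem btGo_cons_odd_nil (l : List Char) (rest : List (List Char))
    (ho : PySem.Int.mod (btAbscom l) 2 ≠ 0) (hdrop : rest.dropWhile btCont = []) :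
    btGo (l :: rest) = [] := by
  rw [btGo]
  rw [if_neg (by simpa using ho)]
  simp [hdrop]

theorem btGo_cons_odd_cons (l : List Char) (rest : List (List Char))
    (close : List Char) (rest' : List (List Char))
    (ho : PySem.Int.mod (btAbscom l) 2 ≠ 0) (hdrop : rest.dropWhile btCont = close :: rest') :
    btGo (l :: rest) =
      PySem.Chars.rstrip l ++ [' ']
        ++ ((rest.takeWhile btCont).map (fun x => PySem.Chars.strip x ++ [' '])).flatten
        ++ PySem.Chars.strip close
        ++ List.replicate ((rest.takeWhile btCont).length + 2) '\n'
        ++ btGo rest' := by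
  rw [btGo]
  rw [if_neg (by simpa using ho)]
  simp only [hdrop, List.head_cons, List.tail_cons]
  rw [dif_neg (by simp : (close :: rest') ≠ [])]

-- rendered continuation lines of a run
def btC (ls : List (List Char)) : List Char :=
  ((ls.takeWhile btCont).map (fun x => PySem.Chars.strip x ++ [' '])).flatten

-- mid-multiline run: starting from a non-empty buffer holding m+1 lines, A consumes the
-- maximal btCont-prefix, then either ends (dropped) or closes the group and restarts fresh
theorem btA_run (ls : List (List Char)) :
    ∀ (buf : List Char), buf ≠ [] → ∀ (m : Nat) (J : List Char),
      (∀ l ∈ ls, PySem.Chars.strip l ≠ []) →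
      ls.foldl btA_step (buf, ((m : Int) + 2), J) =
        (match ls.dropWhile btCont with
         | [] => (buf ++ btC ls, ((m : Int) + 2) + (ls.takeWhile btCont).length, J)
         | close :: rest' =>
             rest'.foldl btA_step
               ([], 1, J ++ buf ++ btC ls ++ PySem.Chars.strip close
                  ++ List.replicate (m + 2 + (ls.takeWhile btCont).length) '\n')) := by
  induction ls with
  | nil => intro buf hbuf m J _; simp [btC]
  | cons l rest ih =>
    intro buf hbuf m J hnb
    have hl : PySem.Chars.strip l ≠ [] := hnb l (List.mem_cons_self)
    rw [List.foldl_cons, btA_step_mid buf hbuf m J l hl]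
    by_cases hc : btCont l = true
    · rw [if_pos hc]
      have hcast : ((m : Int) + 2) + 1 = (((m + 1 : Nat)) : Int) + 2 := by push_cast; ring
      rw [hcast, ih (buf ++ PySem.Chars.strip l ++ [' ']) (by simp) (m + 1) J
        (fun x hx => hnb x (List.mem_cons_of_mem _ hx))]
      rw [List.dropWhile_cons_of_pos hc, List.takeWhile_cons_of_pos hc]
      have hCeq : btC (l :: rest) = (PySem.Chars.strip l ++ [' ']) ++ btC rest := by
        simp [btC, List.takeWhile_cons_of_pos hc]
      cases hdrop : rest.dropWhile btCont with
      | nil =>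
        dsimp only
        refine Prod.ext ?_ (Prod.ext ?_ ?_)
        · simp [hCeq, List.append_assoc]
        · simp only [List.length_cons]
          push_cast
          ring
        · rfl
      | cons close rest' =>
        dsimp only
        congr 1
        refine Prod.ext rfl (Prod.ext rfl ?_)
        simp only [hCeq, List.length_cons]
        have harith : m + 1 + 2 + (rest.takeWhile btCont).length
            = m + 2 + ((rest.takeWhile btCont).length + 1) := by omega
        rw [harith]
        simp [List.append_assoc]
    · rw [if_neg hc]
      have hcF : ¬ btCont l = true := hc
      rw [List.dropWhile_cons_of_neg hcF, List.takeWhile_cons_of_neg hcF]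
      have hC0 : btC (l :: rest) = [] := by
        simp [btC, List.takeWhile_cons_of_neg hcF]
      simp [hC0, List.append_assoc]

-- main invariant: on non-blank lines, A's accumulated json equals J ++ btGo
theorem btMain : ∀ (n : Nat) (ls : List (List Char)), ls.length ≤ n →
    (∀ l ∈ ls, PySem.Chars.strip l ≠ []) → ∀ J : List Char,
    (ls.foldl btA_step ([], 1, J)).2.2 = J ++ btGo ls := by
  intro n
  induction n with
  | zero =>
    intro ls hlen _ J
    cases ls with
    | nil => simp [btGo]
    | cons a as => simp at hlen
  | succ n ih =>
    intro ls hlen hnb J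
    cases ls with
    | nil => simp [btGo]
    | cons l rest =>
      have hl : PySem.Chars.strip l ≠ [] := hnb l (List.mem_cons_self)
      rw [List.foldl_cons, btA_step_fresh J l hl]
      by_cases he : PySem.Int.mod (btAbscom l) 2 = 0
      · rw [if_pos (beq_iff_eq.mpr he)]
        rw [ih rest (by simpa using hlen) (fun x hx => hnb x (List.mem_cons_of_mem _ hx))]
        rw [btGo_cons_even l rest he]
        simp [List.append_assoc]
      · rw [if_neg (by simpa using he)]
        have hrun := btA_run rest (PySem.Chars.rstrip l ++ [' ']) (by simp) 0 J
          (fun x hx => hnb x (List.mem_cons_of_mem _ hx))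
        rw [show ((0 : Nat) : Int) + 2 = 2 from by norm_num] at hrun
        rw [hrun]
        cases hdrop : rest.dropWhile btCont with
        | nil =>
          rw [btGo_cons_odd_nil l rest he hdrop]
          simp
        | cons close rest' =>
          have hsub : ∀ x ∈ rest', PySem.Chars.strip x ≠ [] := by
            intro x hx
            have hx2 : x ∈ rest :=
              (List.dropWhile_sublist btCont).mem (hdrop ▸ List.mem_cons_of_mem _ hx)
            exact hnb x (List.mem_cons_of_mem _ hx2)
          have hlen' : rest'.length ≤ n := by
            have h1 : (rest.dropWhile btCont).length ≤ rest.length :=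
              (List.dropWhile_sublist _).length_le
            rw [hdrop] at h1
            simp only [List.length_cons] at h1 hlen
            omega
          rw [ih rest' hlen' hsub]
          rw [btGo_cons_odd_cons l rest close rest' he hdrop]
          simp only [btC]
          rw [show 0 + 2 + (rest.takeWhile btCont).length
              = (rest.takeWhile btCont).length + 2 from by omega]
          simp [List.append_assoc]

-- ===== VERDICT =====
theorem botson_remove_multiline_spec : Claim_equal_botson_remove_multiline := by
  intro s _
  unfold Spec_botson_remove_multiline botson_remove_multiline botson_remove_multiline_alt
  rw [btA_fold_filter]
  refine congrArg String.ofList ?_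
  have hnb : ∀ l ∈ (PySem.Chars.splitOn s.toList ['\n']).filter
      (fun l => !(PySem.Chars.strip l).isEmpty), PySem.Chars.strip l ≠ [] := by
    intro l hl
    have := List.of_mem_filter hl
    simpa [List.isEmpty_iff] using this
  have h := btMain ((PySem.Chars.splitOn s.toList ['\n']).filter
      (fun l => !(PySem.Chars.strip l).isEmpty)).length
    ((PySem.Chars.splitOn s.toList ['\n']).filter (fun l => !(PySem.Chars.strip l).isEmpty))
    le_rfl hnb []
  simpa using h
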